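-- pv_equiv track=rewrite | github.com/NuGuardAI/Xelo | tests/test_toolbox/evaluate_policies.py | _check_instance_requirement
-- ===== SOURCE A (Python) =====
-- from typing import Dict, List, Optional, Any
--
-- def _node_type(node: Dict[str, Any]) -> str:
--     """Return canonical uppercase component type across legacy/Xelo node shapes."""
--     value = node.get("type") or node.get("component_type") or ""
--     return str(value).upper()
--
-- def _edge_type(edge: Dict[str, Any]) -> str:
--     """Return canonical uppercase relationship type across legacy/Xelo edge shapes."""
--     value = edge.get("type") or edge.get("relationship_type") or ""
--     return str(value).upper()
--
-- def _check_instance_requirement(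
--     instance: Dict,
--     require: Dict,
--     nodes: List[Dict],
--     edges: List[Dict],
-- ) -> bool:
--     """Check if an instance meets requirements."""
--     instance_id = instance.get("id")
--
--     # Check for required relationship
--     rel_type = require.get("relationship")
--     target_type = require.get("target_type")
--
--     if rel_type and target_type:
--         # Find edges from this instance
--         for edge in edges:
--             if edge.get("source") == instance_id and _edge_type(edge) == str(rel_type).upper():
--                 # Check if target is of required type
--                 target_id = edge.get("target")
--                 for node in nodes:
--                     if node.get("id") == target_id and _node_type(node) == str(target_type).upper():
--                         return True
--         return False
--
--     return True
-- ===== SOURCE B (Python) =====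
-- def _canon(primary, fallback):
--     """Canonical uppercase of the first truthy of two optional values."""
--     return str(primary or fallback or "").upper()
--
--
-- def _check_instance_requirement(instance, require, nodes, edges):
--     """Check if an instance meets requirements.
--
--     Staged passes in the reverse order of the naive version: first collect the
--     ids of nodes of the required type into a set, then scan the edges once and
--     return as soon as a matching edge points at one of them.
--     """
--     rel_type = require.get("relationship")
--     target_type = require.get("target_type")
--     if not (rel_type and target_type):
--         return True
--     tgt = str(target_type).upper()
--     typed_ids = {
--         n.get("id") for n in nodes
--         if _canon(n.get("type"), n.get("component_type")) == tgt
--     }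
--     rel = str(rel_type).upper()
--     instance_id = instance.get("id")
--     for edge in edges:
--         if (edge.get("source") == instance_id
--                 and _canon(edge.get("type"), edge.get("relationship_type")) == rel
--                 and edge.get("target") in typed_ids):
--             return True
--     return False
-- ===== Notes on version B (the rewrite author's own statement) =====
-- stated objective: alternative
-- what changed: Inverts and un-nests the scans: one pass over nodes first builds the set of ids of nodes of the required type, then a single early-returning pass over edges checks for a matching edge into that set (A repeatedly scans all nodes inside its edge loop).
import Mathlib
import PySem

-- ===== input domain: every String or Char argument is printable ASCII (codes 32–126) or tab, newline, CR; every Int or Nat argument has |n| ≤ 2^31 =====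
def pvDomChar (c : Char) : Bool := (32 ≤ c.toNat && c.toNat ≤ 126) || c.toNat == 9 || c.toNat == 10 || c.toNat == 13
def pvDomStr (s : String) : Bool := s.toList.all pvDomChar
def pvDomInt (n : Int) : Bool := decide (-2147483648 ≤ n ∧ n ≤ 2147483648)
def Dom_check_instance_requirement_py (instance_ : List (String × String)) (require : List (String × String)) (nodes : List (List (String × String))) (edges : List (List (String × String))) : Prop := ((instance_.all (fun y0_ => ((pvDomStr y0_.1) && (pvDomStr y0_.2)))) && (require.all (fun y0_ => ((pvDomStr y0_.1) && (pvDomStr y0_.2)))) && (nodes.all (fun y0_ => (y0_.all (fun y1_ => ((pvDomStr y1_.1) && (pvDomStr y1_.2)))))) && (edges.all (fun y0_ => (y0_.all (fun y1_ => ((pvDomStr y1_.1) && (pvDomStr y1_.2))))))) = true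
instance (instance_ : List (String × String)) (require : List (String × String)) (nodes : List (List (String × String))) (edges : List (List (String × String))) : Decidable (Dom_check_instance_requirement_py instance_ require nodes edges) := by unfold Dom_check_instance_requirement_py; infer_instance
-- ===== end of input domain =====

-- B inverts and un-nests A's scans: one pass over nodes builds the set of ids of nodes of the
-- required type, then one early-returning pass over edges checks into that set (objective: alternative).

-- ===== PORT A =====
-- d.get(k) on the association list (Python dict: last duplicate key wins)
def pvGet (d : List (String × String)) (k : String) : Option String :=
  (PySem.Dict.ofList d).get? k

-- Python truthiness of an Optional[str]
def pvTruthy (o : Option String) : Bool :=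
  match o with
  | some s => s ≠ ""
  | none => false

-- node.get("type") or node.get("component_type") or "" , then .upper()
def pvNodeType (node : List (String × String)) : String :=
  PySem.Str.upper
    (if pvTruthy (pvGet node "type") then (pvGet node "type").getD ""
     else if pvTruthy (pvGet node "component_type") then (pvGet node "component_type").getD ""
     else "")

def pvEdgeType (edge : List (String × String)) : String :=
  PySem.Str.upper
    (if pvTruthy (pvGet edge "type") then (pvGet edge "type").getD ""
     else if pvTruthy (pvGet edge "relationship_type") then (pvGet edge "relationship_type").getD ""
     else "")

def check_instance_requirement_py (instance_ : List (String × String)) (require : List (String × String)) (nodes : List (List (String × String))) (edges : List (List (String × String))) : Bool :=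
  let instance_id := pvGet instance_ "id"
  let rel_type := pvGet require "relationship"
  let target_type := pvGet require "target_type"
  if pvTruthy rel_type && pvTruthy target_type then
    -- for edge in edges: … return True / fall through = List.any
    edges.any (fun edge =>
      (pvGet edge "source" == instance_id) &&
      (pvEdgeType edge == PySem.Str.upper (rel_type.getD "")) &&
      nodes.any (fun node =>
        (pvGet node "id" == pvGet edge "target") &&
        (pvNodeType node == PySem.Str.upper (target_type.getD ""))))
  else
    true

-- ===== PORT B =====
-- B's dict lookup (same Python .get(); separate name to keep B's code self-contained)
def bGet (d : List (String × String)) (k : String) : Option String :=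
  (PySem.Dict.ofList d).get? k

-- Python's 'x or y' on Optional[str] operands (falsy = None or "")
def bOr (a b : Option String) : Option String :=
  match a with
  | some s => if s = "" then b else some s
  | none => b

-- _canon(primary, fallback) = str(primary or fallback or "").upper()
def bCanon (primary fallback : Option String) : String :=
  PySem.Str.upper ((bOr primary (bOr fallback (some ""))).getD "")

-- typed_ids = {n.get("id") for n in nodes if _canon(...) == tgt}
def bTypedIds (tgt : String) (nodes : List (List (String × String))) : PySem.Set (Option String) :=
  PySem.Set.ofList
    ((nodes.filter (fun n => bCanon (bGet n "type") (bGet n "component_type") == tgt)).map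
      (fun n => bGet n "id"))

-- the early-returning for-loop over edges
def bEdgeScan (instance_id : Option String) (rel : String) (typed : PySem.Set (Option String)) : List (List (String × String)) → Bool
  | [] => false
  | edge :: rest =>
    if (bGet edge "source" == instance_id) &&
       (bCanon (bGet edge "type") (bGet edge "relationship_type") == rel) &&
       PySem.Set.contains typed (bGet edge "target") then
      true
    else
      bEdgeScan instance_id rel typed rest

def check_instance_requirement_py_alt (instance_ : List (String × String)) (require : List (String × String)) (nodes : List (List (String × String))) (edges : List (List (String × String))) : Bool :=
  let rel_type := bGet require "relationship"
  let target_type := bGet require "target_type"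
  if !((rel_type.getD "" ≠ "") && (target_type.getD "" ≠ "")) then
    true
  else
    let tgt := PySem.Str.upper (target_type.getD "")
    let typed := bTypedIds tgt nodes
    let rel := PySem.Str.upper (rel_type.getD "")
    bEdgeScan (bGet instance_ "id") rel typed edges

-- ===== PRECONDITION & SPEC =====
def Spec_check_instance_requirement_py (instance_ : List (String × String)) (require : List (String × String)) (nodes : List (List (String × String))) (edges : List (List (String × String))) (out : Bool) : Prop := out = check_instance_requirement_py_alt instance_ require nodes edges
instance (instance_ : List (String × String)) (require : List (String × String)) (nodes : List (List (String × String))) (edges : List (List (String × String))) (out : Bool) : Decidable (Spec_check_instance_requirement_py instance_ require nodes edges out) := by unfold Spec_check_instance_requirement_py; infer_instance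

-- ===== CLAIM (what is proved, stated in full; the proofs are below) =====
def Claim_equal_check_instance_requirement_py : Prop := ∀ (instance_ : List (String × String)) (require : List (String × String)) (nodes : List (List (String × String))) (edges : List (List (String × String))), Dom_check_instance_requirement_py instance_ require nodes edges → Spec_check_instance_requirement_py instance_ require nodes edges (check_instance_requirement_py instance_ require nodes edges)

-- ===== LEMMAS AND PROOFS =====

theorem bGet_eq_pvGet (d : List (String × String)) (k : String) : bGet d k = pvGet d k := rfl

-- B's _canon computes the same string as A's first-truthy chain
theorem bCanon_eq (a b : Option String) :
    bCanon a b =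
      PySem.Str.upper
        (if pvTruthy a then a.getD ""
         else if pvTruthy b then b.getD ""
         else "") := by
  unfold bCanon bOr pvTruthy
  cases a with
  | none =>
    cases b with
    | none => simp
    | some t => by_cases ht : t = "" <;> simp [ht]
  | some s =>
    by_cases hs : s = ""
    · cases b with
      | none => simp [hs]
      | some t => by_cases ht : t = "" <;> simp [hs, ht]
    · simp [hs]

-- B's edge loop is an existential over edges
theorem bEdgeScan_eq_any (instance_id : Option String) (rel : String)
    (typed : PySem.Set (Option String)) (edges : List (List (String × String))) :
    bEdgeScan instance_id rel typed edges =
      edges.any (fun edge =>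
        (bGet edge "source" == instance_id) &&
        (bCanon (bGet edge "type") (bGet edge "relationship_type") == rel) &&
        PySem.Set.contains typed (bGet edge "target")) := by
  induction edges with
  | nil => rfl
  | cons e rest ih =>
    unfold bEdgeScan
    split_ifs with h
    · rw [List.any_cons, h, Bool.true_or]
    · rw [List.any_cons, Bool.eq_false_iff.mpr h, Bool.false_or, ih]

-- membership in B's typed-node id set
theorem contains_bTypedIds (tgt : String) (nodes : List (List (String × String))) (x : Option String) :
    (PySem.Set.contains (bTypedIds tgt nodes) x = true) ↔
      ∃ n ∈ nodes, (bCanon (bGet n "type") (bGet n "component_type") == tgt) = true ∧ bGet n "id" = x := by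
  unfold bTypedIds
  rw [PySem.Set.contains_iff, PySem.Set.mem_ofList]
  simp only [List.mem_map, List.mem_filter]
  aesop

-- truthiness of an Optional[str] in terms of its getD ""
theorem pvTruthy_iff (o : Option String) : pvTruthy o = !decide (o.getD "" = "") := by
  cases o <;> simp [pvTruthy]

theorem check_instance_requirement_py_eq_alt (instance_ : List (String × String)) (require : List (String × String)) (nodes : List (List (String × String))) (edges : List (List (String × String))) :
    check_instance_requirement_py instance_ require nodes edges =
      check_instance_requirement_py_alt instance_ require nodes edges := by
  unfold check_instance_requirement_py check_instance_requirement_py_alt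
  simp only [bGet_eq_pvGet, pvTruthy_iff]
  by_cases hr : (pvGet require "relationship").getD "" = ""
  · rw [if_neg (by simp [hr]), if_pos (by simp [hr])]
  by_cases ht : (pvGet require "target_type").getD "" = ""
  · rw [if_neg (by simp [ht]), if_pos (by simp [ht])]
  · rw [if_pos (by simp [hr, ht]), if_neg (by simp [hr, ht])]
    rw [bEdgeScan_eq_any, Bool.eq_iff_iff]
    simp only [List.any_eq_true]
    constructor
    · rintro ⟨e, he, hP⟩
      rw [Bool.and_eq_true, Bool.and_eq_true] at hP
      obtain ⟨⟨h1, h2⟩, hany⟩ := hP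
      rw [List.any_eq_true] at hany
      obtain ⟨n, hn, hn2⟩ := hany
      rw [Bool.and_eq_true] at hn2
      refine ⟨e, he, ?_⟩
      rw [Bool.and_eq_true, Bool.and_eq_true]
      refine ⟨⟨h1, by rw [bGet_eq_pvGet, bGet_eq_pvGet, bCanon_eq]; exact h2⟩, ?_⟩
      rw [contains_bTypedIds]
      exact ⟨n, hn, by rw [bGet_eq_pvGet, bGet_eq_pvGet, bCanon_eq]; exact hn2.2,
             by rw [bGet_eq_pvGet]; exact beq_iff_eq.mp hn2.1⟩
    · rintro ⟨e, he, hP⟩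
      rw [Bool.and_eq_true, Bool.and_eq_true] at hP
      obtain ⟨⟨h1, h2⟩, hc⟩ := hP
      rw [contains_bTypedIds] at hc
      obtain ⟨n, hn, hnt, hnid⟩ := hc
      refine ⟨e, he, ?_⟩
      rw [Bool.and_eq_true, Bool.and_eq_true]
      refine ⟨⟨h1, by rw [bGet_eq_pvGet, bGet_eq_pvGet, bCanon_eq] at h2; exact h2⟩, ?_⟩
      rw [List.any_eq_true]
      refine ⟨n, hn, ?_⟩
      rw [Bool.and_eq_true]
      exact ⟨beq_iff_eq.mpr (by rw [bGet_eq_pvGet] at hnid; exact hnid),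
             by rw [bGet_eq_pvGet, bGet_eq_pvGet, bCanon_eq] at hnt; exact hnt⟩

-- ===== VERDICT (by name: the statement is the Claim_ definition above) =====
theorem check_instance_requirement_py_spec : Claim_equal_check_instance_requirement_py := by
  intro i r n e _
  exact check_instance_requirement_py_eq_alt i r n e
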